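-- pv_equiv track=rewrite | github.com/Kaleaon/Pentary | tools/pentary_converter_optimized.py | decimal_to_array
-- ===== SOURCE A (Python) =====
-- from typing import List, Tuple, Optional
--
-- def decimal_to_array(n: int) -> List[int]:
--     """
--     Convert decimal integer to pentary digit array.
--
--     Args:
--         n: Decimal integer
--
--     Returns:
--         List of pentary digits (most significant first)
--     """
--     if n == 0:
--         return [0]
--
--     digits = []
--     negative = n < 0
--     n = abs(n)
--
--     while n > 0:
--         remainder = n % 5
--         n = n // 5
--
--         # Convert to balanced form
--         if remainder <= 2:
--             digits.append(remainder)
--         else: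
--             # remainder is 3 or 4
--             digits.append(remainder - 5)
--             n += 1
--
--     # Reverse to get most significant first
--     digits.reverse()
--
--     # Apply negation if needed
--     if negative:
--         digits = [-d for d in digits]
--
--     return digits
-- ===== SOURCE B (Python) =====
-- def decimal_to_array(n: int) -> list:
--     if n == 0:
--         return [0]
--     m = abs(n)
--     digits = []
--     while m > 0:
--         digits.append(m % 5)
--         m //= 5
--     carry = 0
--     out = []
--     for d in digits:
--         d += carry
--         carry = 0
--         if d >= 3:
--             d -= 5
--             carry = 1
--         out.append(d)
--     if carry:
--         out.append(1)
--     out.reverse()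
--     if n < 0:
--         out = [-d for d in out]
--     return out
-- ===== Notes on version B (the rewrite author's own statement) =====
-- stated objective: alternative
-- what changed: B first extracts the plain (unbalanced) base-5 digits in one loop, then balances them in a separate carry-propagation pass over the digit list, instead of A's single loop that rebalances each remainder by feeding the carry back into the quotient.
import Mathlib
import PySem

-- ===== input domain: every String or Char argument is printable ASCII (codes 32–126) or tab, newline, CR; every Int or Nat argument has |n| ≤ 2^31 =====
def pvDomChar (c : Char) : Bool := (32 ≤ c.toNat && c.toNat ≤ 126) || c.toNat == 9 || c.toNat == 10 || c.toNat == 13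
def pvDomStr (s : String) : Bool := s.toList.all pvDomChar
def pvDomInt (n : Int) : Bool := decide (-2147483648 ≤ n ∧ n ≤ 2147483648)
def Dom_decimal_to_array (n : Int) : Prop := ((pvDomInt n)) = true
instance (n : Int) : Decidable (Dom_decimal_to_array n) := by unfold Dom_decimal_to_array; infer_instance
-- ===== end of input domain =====

-- B replaces A's single rebalancing division loop by two passes (plain base-5 extraction, then a carry-propagation balancing pass): an alternative decomposition of the same cost.


-- ===== PORT A =====
-- A's while-loop: remainder = n % 5, n //= 5; remainders 3/4 become remainder-5 with n += 1.
def pyLoopA (n : Int) : List Int :=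
  if h : 0 < n then
    let r := PySem.Int.mod n 5
    let q := PySem.Int.floordiv n 5
    if r ≤ 2 then r :: pyLoopA q
    else (r - 5) :: pyLoopA (q + 1)
  else []
termination_by n.toNat
decreasing_by
  · have h5 : (0:Int) < 5 := by norm_num
    rw [PySem.Int.floordiv_eq_ediv_of_pos h5]
    omega
  · have h5 : (0:Int) < 5 := by norm_num
    have hr : ¬ PySem.Int.mod n 5 ≤ 2 := by assumption
    rw [PySem.Int.mod_eq_emod_of_pos h5] at hr
    rw [PySem.Int.floordiv_eq_ediv_of_pos h5]
    omega

def decimal_to_array (n : Int) : List Int :=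
  if n = 0 then [0]
  else
    let negative := n < 0
    let digits := (pyLoopA |n|).reverse
    if negative then digits.map (fun d => -d) else digits

-- ===== PORT B =====
-- B's first pass: plain base-5 digits, least significant first.
def rawB (n : Int) : List Int :=
  if _h : 0 < n then PySem.Int.mod n 5 :: rawB (PySem.Int.floordiv n 5) else []
termination_by n.toNat
decreasing_by
  · have h5 : (0:Int) < 5 := by norm_num
    rw [PySem.Int.floordiv_eq_ediv_of_pos h5]
    omega

-- B's second pass: carry propagation turning digits 3..5 into d-5 with carry 1.
def balanceB (c : Int) : List Int → List Int
  | [] => if c ≠ 0 then [1] else []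
  | d :: rest =>
      let d' := d + c
      if 3 ≤ d' then (d' - 5) :: balanceB 1 rest else d' :: balanceB 0 rest

def decimal_to_array_alt (n : Int) : List Int :=
  if n = 0 then [0]
  else
    let ds := (balanceB 0 (rawB |n|)).reverse
    if n < 0 then ds.map (fun d => -d) else ds

-- ===== PRECONDITION & SPEC =====
def Spec_decimal_to_array (n : Int) (out : List Int) : Prop := out = decimal_to_array_alt n
instance (n : Int) (out : List Int) : Decidable (Spec_decimal_to_array n out) := by unfold Spec_decimal_to_array; infer_instance

-- ===== CLAIM (what is proved, stated in full; the proofs are below) =====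
def Claim_equal_decimal_to_array : Prop := ∀ (n : Int), Dom_decimal_to_array n → Spec_decimal_to_array n (decimal_to_array n)

-- ===== LEMMAS AND PROOFS =====

-- Loop invariant: balancing the raw digits of m with incoming carry c (0 or 1)
-- yields exactly A's loop output on m + c.
theorem balance_raw_eq_loopA (m c : Int) (hm : 0 ≤ m) (hc : c = 0 ∨ c = 1) :
    balanceB c (rawB m) = pyLoopA (m + c) := by
  have h5 : (0:Int) < 5 := by norm_num
  by_cases h : 0 < m
  · have hq0 : 0 ≤ PySem.Int.floordiv m 5 := by
      rw [PySem.Int.floordiv_eq_ediv_of_pos h5]; omega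
    have hrec0 := balance_raw_eq_loopA (PySem.Int.floordiv m 5) 0 hq0 (Or.inl rfl)
    have hrec1 := balance_raw_eq_loopA (PySem.Int.floordiv m 5) 1 hq0 (Or.inr rfl)
    rw [rawB]
    simp only [h, dite_true]
    rw [balanceB]
    conv_rhs => rw [pyLoopA]
    have hpos : 0 < m + c := by omega
    rw [dif_pos hpos]
    simp only [PySem.Int.mod_eq_emod_of_pos h5, PySem.Int.floordiv_eq_ediv_of_pos h5]
      at hrec0 hrec1 ⊢
    by_cases hd : 3 ≤ m % 5 + c
    · simp only [hd, if_true]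
      by_cases h5c : m % 5 + c = 5
      · have hr : (m + c) % 5 = 0 := by omega
        have hq : (m + c) / 5 = m / 5 + 1 := by omega
        have hle : (m + c) % 5 ≤ 2 := by omega
        rw [if_pos hle, hr, hq, hrec1]
        have hz : m % 5 + c - 5 = 0 := by omega
        rw [hz]
      · have hr : (m + c) % 5 = m % 5 + c := by omega
        have hq : (m + c) / 5 = m / 5 := by omega
        have hle : ¬ (m + c) % 5 ≤ 2 := by omega
        rw [if_neg hle, hr, hq, hrec1]
    · simp only [hd, if_false]
      have hr : (m + c) % 5 = m % 5 + c := by omega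
      have hq : (m + c) / 5 = m / 5 := by omega
      have hle : (m + c) % 5 ≤ 2 := by omega
      rw [if_pos hle, hr, hq]
      rw [add_zero] at hrec0
      rw [hrec0]
  · have hm0 : m = 0 := by omega
    subst hm0
    rw [rawB]
    simp only [lt_irrefl, dite_false]
    rcases hc with rfl | rfl
    · rw [balanceB, pyLoopA]
      norm_num
    · rw [balanceB]
      norm_num
      have h1 : PySem.Int.mod 1 5 = 1 := by
        rw [PySem.Int.mod_eq_emod_of_pos h5]; decide
      have h2 : PySem.Int.floordiv 1 5 = 0 := by
        rw [PySem.Int.floordiv_eq_ediv_of_pos h5]; decide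
      rw [pyLoopA, dif_pos one_pos, h1, h2, if_pos (by norm_num : (1:Int) ≤ 2),
        pyLoopA, dif_neg (lt_irrefl 0)]
termination_by m.toNat
decreasing_by
  all_goals
    have h5 : (0:Int) < 5 := by norm_num
    rw [PySem.Int.floordiv_eq_ediv_of_pos h5]
    omega

-- ===== VERDICT (by name: the statement is the Claim_ definition above) =====
theorem decimal_to_array_spec : Claim_equal_decimal_to_array := by
  intro n _
  unfold Spec_decimal_to_array decimal_to_array decimal_to_array_alt
  by_cases h0 : n = 0
  · simp [h0]
  · simp only [h0, if_false]
    have := balance_raw_eq_loopA |n| 0 (abs_nonneg n) (Or.inl rfl)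
    rw [add_zero] at this
    rw [this]
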